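-- pv_equiv track=rewrite | github.com/jozef-mokry/nmt | nematus/util.py | seqs2words
-- ===== SOURCE A (Python) =====
-- def seqs2words(seq, inverse_target_dictionary):
--     words = []
--     for i, w in enumerate(seq):
--         if w == 0:
--             assert (i == len(seq) - 1) or (seq[i+1] == 0), ('Zero not at the end of sequence', seq)
--         elif w in inverse_target_dictionary:
--             words.append(inverse_target_dictionary[w])
--         else:
--             words.append('UNK')
--     return ' '.join(words)
-- ===== SOURCE B (Python) =====
-- def seqs2words(seq, inverse_target_dictionary):
--     # two-phase: find the first-zero boundary, validate the tail, then map the prefix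
--     try:
--         k = seq.index(0)
--     except ValueError:
--         k = len(seq)
--     assert all(w == 0 for w in seq[k:]), ('Zero not at the end of sequence', seq)
--     return ' '.join(inverse_target_dictionary.get(w, 'UNK') for w in seq[:k])
-- ===== Notes on version B (the rewrite author's own statement) =====
-- stated objective: simpler
-- what changed: Replaces A's single interleaved enumerate loop (per-element zero check with lookahead assert plus append) by a two-phase computation: find the first-zero boundary with seq.index(0), validate the tail in one all() pass, then map only the prefix with dict.get('UNK' fallback) into ' '.join.
import Mathlib
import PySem

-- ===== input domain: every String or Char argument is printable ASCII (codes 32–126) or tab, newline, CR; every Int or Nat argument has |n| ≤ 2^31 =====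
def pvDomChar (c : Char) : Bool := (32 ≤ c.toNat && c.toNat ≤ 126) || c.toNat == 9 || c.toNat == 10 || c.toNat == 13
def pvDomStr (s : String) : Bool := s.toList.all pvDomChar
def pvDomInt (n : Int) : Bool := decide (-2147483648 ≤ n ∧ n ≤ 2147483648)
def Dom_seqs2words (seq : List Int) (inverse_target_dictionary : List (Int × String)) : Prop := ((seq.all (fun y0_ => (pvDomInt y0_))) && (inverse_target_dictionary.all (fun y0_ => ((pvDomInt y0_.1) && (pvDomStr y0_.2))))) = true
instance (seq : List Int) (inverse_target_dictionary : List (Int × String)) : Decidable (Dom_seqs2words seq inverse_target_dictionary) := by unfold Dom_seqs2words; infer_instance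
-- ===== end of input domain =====

-- B replaces A's single interleaved loop by a two-phase computation (find the first-zero
-- boundary, then map only the prefix); objective: simpler. Return-value equivalence on Pre_.

-- ===== PORT A =====
-- A's loop: skip zeros (the assert raises outside Pre_ and is value-neutral inside it),
-- append dict[w] on a hit, 'UNK' otherwise; finally ' '.join.
def seqs2words (seq : List Int) (inverse_target_dictionary : List (Int × String)) : String :=
  let words := (PySem.List.enumerate seq 0).foldl (fun ws p =>
    if p.2 == 0 then ws
    else match inverse_target_dictionary.lookup p.2 with
      | some v => ws ++ [v]
      | none => ws ++ ["UNK"]) []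
  PySem.Str.join " " words

-- ===== PORT B =====
-- B: k = index of first 0 (or len); the all()-validation raises outside Pre_ (value-neutral
-- inside it); map seq[:k] through dict.get(w, 'UNK') and join.
def seqs2words_alt (seq : List Int) (inverse_target_dictionary : List (Int × String)) : String :=
  let k : Nat := (PySem.List.index? seq 0).getD seq.length
  PySem.Str.join " "
    ((PySem.List.slice seq none (some (k : Int))).map
      (fun w => (inverse_target_dictionary.lookup w).getD "UNK"))

-- ===== PRECONDITION & SPEC =====
-- Pre_ excludes exactly the inputs where a zero is followed by a nonzero element: there both
-- A and B raise AssertionError ('Zero not at the end of sequence', seq).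
def Pre_seqs2words (seq : List Int) (inverse_target_dictionary : List (Int × String)) : Prop :=
  ((seq.dropWhile (fun w => w != 0)).all (fun w => w == 0)) = true
instance (seq : List Int) (inverse_target_dictionary : List (Int × String)) : Decidable (Pre_seqs2words seq inverse_target_dictionary) := by unfold Pre_seqs2words; infer_instance
def pvWitness_seqs2words : List Int × (List (Int × String)) := ([1, 2, 0, 0], [(1, "a")])

def Spec_seqs2words (seq : List Int) (inverse_target_dictionary : List (Int × String)) (out : String) : Prop := out = seqs2words_alt seq inverse_target_dictionary
instance (seq : List Int) (inverse_target_dictionary : List (Int × String)) (out : String) : Decidable (Spec_seqs2words seq inverse_target_dictionary out) := by unfold Spec_seqs2words; infer_instance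

-- ===== CLAIM =====
def Claim_equal_seqs2words : Prop := ∀ (seq : List Int) (inverse_target_dictionary : List (Int × String)), Dom_seqs2words seq inverse_target_dictionary → Pre_seqs2words seq inverse_target_dictionary → Spec_seqs2words seq inverse_target_dictionary (seqs2words seq inverse_target_dictionary)

-- ===== LEMMAS AND PROOFS =====

theorem seqs2words_foldl_eq (d : List (Int × String)) :
    ∀ (seq : List Int) (s : Int) (acc : List String),
      (PySem.List.enumerate seq s).foldl (fun ws p =>
        if p.2 == 0 then ws
        else match d.lookup p.2 with
          | some v => ws ++ [v]
          | none => ws ++ ["UNK"]) acc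
      = acc ++ (seq.filter (fun w => !(w == 0))).map (fun w => (d.lookup w).getD "UNK") := by
  intro seq
  induction seq with
  | nil => intro s acc; simp [PySem.List.enumerate_nil]
  | cons x xs ih =>
    intro s acc
    rw [PySem.List.enumerate_cons, List.foldl_cons, List.filter_cons]
    by_cases hx : x = 0
    · simp only [hx]
      simp
      simpa using ih (s + 1) acc
    · cases h : d.lookup x with
      | some v =>
        simp [hx, h]
        simpa using ih (s + 1) (acc ++ [v])
      | none =>
        simp [hx, h]
        simpa using ih (s + 1) (acc ++ ["UNK"])

theorem seqs2words_filter_eq_take (seq : List Int)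
    (h : ((seq.dropWhile (fun w => w != 0)).all (fun w => w == 0)) = true) :
    seq.filter (fun w => !(w == 0)) = seq.take ((PySem.List.index? seq 0).getD seq.length) := by
  induction seq with
  | nil => simp
  | cons x xs ih =>
    by_cases hx : x = 0
    · subst hx
      have hall : (List.dropWhile (fun w => w != 0) (0 :: xs)) = 0 :: xs := by
        simp [List.dropWhile]
      rw [hall] at h
      simp only [List.all_cons, Bool.and_eq_true] at h
      have hfil : xs.filter (fun w => !(w == 0)) = [] := by
        rw [List.filter_eq_nil_iff]
        intro a ha
        have := h.2
        rw [List.all_eq_true] at this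
        simpa using this a ha
      rw [PySem.List.index?_cons_self]
      simp [hfil]
    · have hpre : ((xs.dropWhile (fun w => w != 0)).all (fun w => w == 0)) = true := by
        rwa [List.dropWhile_cons_of_pos (by simpa using hx)] at h
      rw [PySem.List.index?_cons_of_ne xs hx]
      have hfx : (!(x == 0)) = true := by simp [hx]
      rw [List.filter_cons, hfx, ih hpre]
      cases hk : PySem.List.index? xs 0 with
      | none => simp [List.take_succ_cons]
      | some k => simp [List.take_succ_cons]

-- ===== VERDICT =====
theorem seqs2words_spec : Claim_equal_seqs2words := by
  intro seq d _ hpre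
  unfold Spec_seqs2words
  show seqs2words seq d = seqs2words_alt seq d
  rw [seqs2words, seqs2words_alt]
  simp only [PySem.List.slice_to_natCast, seqs2words_foldl_eq, List.nil_append,
    seqs2words_filter_eq_take seq hpre]
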